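-- pv_equiv track=rewrite | github.com/resb53/advent | 2021/src/day-24.py | addInput
-- ===== SOURCE A (Python) =====
-- from collections import defaultdict
--
-- def runSimply(instr, input):
--     instr = instr.copy()
--     z = 0
--
--     for val in input:
--         vars = instr.pop(0)
--         remainder = z % 26
--         z = z // vars[0]
--         if remainder + vars[1] != val:
--             z = ((26 * z) + val + vars[2])
--
--     return z
--
-- def addInput(zeds, instr):
--     newzeds = defaultdict(int)
--     dupes = 0
--     for f in zeds.values():
--         for g in range(1, 10):
--             val = int(str(f) + str(g))
--             vals = [int(i) for i in list(str(val))]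
--             z = runSimply(instr, vals)
--             if val > newzeds[z]:
--                 newzeds[z] = val
--             else:
--                 dupes += 1
--
--     return newzeds
-- ===== SOURCE B (Python) =====
-- def _step(z, v, d):
--     r = z % 26
--     z //= v[0]
--     if r + v[1] != d:
--         z = 26 * z + d + v[2]
--     return z
--
-- def addInput(zeds, instr):
--     out = {}
--     for f in zeds.values():
--         pref = [] if f == 0 else [int(c) for c in str(f)]
--         z = 0
--         for i, d in enumerate(pref):
--             z = _step(z, instr[i], d)
--         v = instr[len(pref)]
--         for g in range(1, 10):
--             zg = _step(z, v, g)
--             val = 10 * f + g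
--             if val > out.get(zg, 0):
--                 out[zg] = val
--     return out
-- ===== Notes on version B (the rewrite author's own statement) =====
-- stated objective: faster
-- what changed: A re-builds the string str(f)+str(g), re-parses it, re-splits it into digits and re-runs the whole instruction sequence from z=0 for each of the 9 digits g; B computes the z-state of the shared prefix str(f) once per stored value and applies only the single next MONAD instruction for each g, so the per-value work drops from 9 full passes to one pass plus 9 single steps.
import Mathlib
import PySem

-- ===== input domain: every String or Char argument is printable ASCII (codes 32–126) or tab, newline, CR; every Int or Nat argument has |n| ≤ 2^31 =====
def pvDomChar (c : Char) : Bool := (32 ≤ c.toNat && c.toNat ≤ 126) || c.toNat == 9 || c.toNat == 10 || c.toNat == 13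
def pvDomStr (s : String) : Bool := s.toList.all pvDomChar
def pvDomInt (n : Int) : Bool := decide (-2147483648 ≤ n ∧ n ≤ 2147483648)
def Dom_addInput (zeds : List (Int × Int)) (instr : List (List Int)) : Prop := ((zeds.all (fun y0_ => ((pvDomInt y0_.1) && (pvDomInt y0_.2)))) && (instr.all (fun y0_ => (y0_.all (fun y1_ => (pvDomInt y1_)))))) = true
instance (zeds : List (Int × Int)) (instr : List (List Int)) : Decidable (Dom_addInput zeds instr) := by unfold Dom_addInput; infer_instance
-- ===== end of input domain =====

-- B re-implements addInput so that, per stored value f, the z-state of the shared digit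
-- prefix str(f) is computed ONCE and only the one new MONAD step runs for each digit g=1..9,
-- instead of re-building a string and re-running the whole instruction sequence 9 times
-- (objective: faster by a constant factor; return value proved identical under Pre_).

-- ===== PORT A =====
-- runSimply(instr, input): pops the front instruction per digit and steps z.
-- instr.pop(0) on an exhausted list / vars[0..2] on a short row / z //= 0 raise in Python;
-- those inputs are excluded by Pre_addInput below (the defaults here are never reached there).
def runSimply (instr : List (List Int)) (input : List Int) : Int :=
  (input.foldl
    (fun (s : List (List Int) × Int) val =>
      let vars := s.1.headD []
      let rest := s.1.tail
      let remainder := PySem.Int.mod s.2 26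
      let z1 := PySem.Int.floordiv s.2 (PySem.List.pyGetD vars 0 0)
      let z2 := if remainder + PySem.List.pyGetD vars 1 0 ≠ val
                then 26 * z1 + val + PySem.List.pyGetD vars 2 0 else z1
      (rest, z2))
    (instr, 0)).2

-- addInput: for every stored value f and digit g, parse int(str(f)+str(g)), re-split its
-- decimal string into digits, run runSimply on them, and keep the max value per z key
-- (defaultdict access inserts key 0 first; the dead `dupes` counter is the second state slot).
def addInput (zeds : List (Int × Int)) (instr : List (List Int)) : List (Int × Int) :=
  (((PySem.Dict.mk zeds).values).foldl
    (fun (s : PySem.Dict Int Int × Int) f =>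
      (PySem.List.pyRange 1 10 1).foldl
        (fun (s : PySem.Dict Int Int × Int) g =>
          let val := (PySem.Int.ofChars? (PySem.Int.toChars f ++ PySem.Int.toChars g)).getD 0
          let vals := (PySem.Int.toChars val).map (fun c => (PySem.Int.ofChars? [c]).getD 0)
          let z := runSimply instr vals
          match PySem.Dict.get? s.1 z with
          | some cur => if val > cur then (PySem.Dict.insert s.1 z val, s.2) else (s.1, s.2 + 1)
          | none =>
            let d0 := PySem.Dict.insert s.1 z (0 : Int)
            if val > 0 then (PySem.Dict.insert d0 z val, s.2) else (d0, s.2 + 1))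
        s)
    (PySem.Dict.empty, (0 : Int))).1.items

-- ===== PORT B =====
-- one MONAD step: z' after feeding digit d with instruction row v = [a, b, c].
def stepMONAD (z : Int) (v : List Int) (d : Int) : Int :=
  let r := PySem.Int.mod z 26
  let z1 := PySem.Int.floordiv z (PySem.List.pyGetD v 0 0)
  if r + PySem.List.pyGetD v 1 0 ≠ d then 26 * z1 + d + PySem.List.pyGetD v 2 0 else z1

-- addInput_alt: per value f compute the prefix z over str(f)'s digits once (instr[i] indexed
-- directly, in range under Pre_addInput), then apply the single next instruction to each g.
def addInput_alt (zeds : List (Int × Int)) (instr : List (List Int)) : List (Int × Int) :=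
  (((PySem.Dict.mk zeds).values).foldl
    (fun (out : PySem.Dict Int Int) f =>
      let pref : List Int :=
        if f = 0 then []
        else (PySem.Int.toChars f).map (fun c => (PySem.Int.ofChars? [c]).getD 0)
      let z := (PySem.List.enumerate pref 0).foldl
        (fun z p => stepMONAD z (PySem.List.pyGetD instr p.1 []) p.2) 0
      let v := PySem.List.pyGetD instr (pref.length : Int) []
      (PySem.List.pyRange 1 10 1).foldl
        (fun out g =>
          let zg := stepMONAD z v g
          let val := 10 * f + g
          if val > PySem.Dict.getD out zg 0 then PySem.Dict.insert out zg val else out)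
        out)
    PySem.Dict.empty).items

-- ===== PRECONDITION & SPEC =====
-- Pre_addInput: exactly the inputs where Python A returns normally: every stored value f is
-- ≥ 0 (str(f) of a negative f makes int('-') raise ValueError), and for every f the rows
-- instr[0..len(str(f))] that the run consumes exist (pop(0) raises IndexError), have at least
-- 3 entries (vars[1]/vars[2] raise IndexError) and a nonzero divisor vars[0] (ZeroDivisionError).
-- Requiring len ≥ 3 on each consumed row slightly over-excludes: a consumed row of length 2
-- survives in Python when the `remainder + vars[1] != val` branch never fires for it (see cites).
def Pre_addInput (zeds : List (Int × Int)) (instr : List (List Int)) : Prop :=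
  ∀ p ∈ zeds, 0 ≤ p.2 ∧
    (PySem.Int.toChars p.2).length + 1 ≤ instr.length ∧
    ∀ i < (PySem.Int.toChars p.2).length + 1,
      3 ≤ (instr.getD i []).length ∧ (instr.getD i []).getD 0 0 ≠ 0
instance (zeds : List (Int × Int)) (instr : List (List Int)) : Decidable (Pre_addInput zeds instr) := by unfold Pre_addInput; infer_instance

def pvWitness_addInput : (List (Int × Int)) × List (List Int) :=
  ([(0, 13)], [[1, 10, 10], [1, 11, 6], [26, -5, 5]])

def Spec_addInput (zeds : List (Int × Int)) (instr : List (List Int)) (out : List (Int × Int)) : Prop := out = addInput_alt zeds instr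
instance (zeds : List (Int × Int)) (instr : List (List Int)) (out : List (Int × Int)) : Decidable (Spec_addInput zeds instr out) := by unfold Spec_addInput; infer_instance

-- ===== CLAIM (what is proved, stated in full; the proofs are below) =====
def Claim_equal_addInput : Prop := ∀ (zeds : List (Int × Int)) (instr : List (List Int)), Dom_addInput zeds instr → Pre_addInput zeds instr → Spec_addInput zeds instr (addInput zeds instr)

-- ===== LEMMAS AND PROOFS =====

-- The decimal parser inside PySem.Int.ofChars? is a private definition; parse_exists captures
-- it abstractly (D = the digit-string reader, G = its accumulator loop) together with its
-- defining equations, all by definitional unfolding; everything below is proved from them.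
theorem parse_exists : ∃ (D : List Char → Option Nat) (G : List Char → Bool → Nat → Option Nat),
    (∀ s, PySem.Int.ofChars? s =
      (match ((s.dropWhile PySem.Int.isIntSpace).reverse.dropWhile PySem.Int.isIntSpace).reverse with
       | '-' :: ds => Option.map (fun n => -n) (do let a ← D ds; pure ((a : Nat) : Int))
       | '+' :: ds => Option.map (fun n => n) (do let a ← D ds; pure ((a : Nat) : Int))
       | ds => Option.map (fun n => n) (do let a ← D ds; pure ((a : Nat) : Int)))) ∧
    (∀ l, D ('0' :: l) = G l true 0) ∧
    (D [] = none) ∧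
    (∀ c l, D (c :: l) = G (c :: l) false 0) ∧
    (∀ b a, G [] b a = if b = true then some a else none) ∧
    (∀ c b a, G [c] b a = if c.isDigit = true then G [] true (a * 10 + (c.toNat - '0'.toNat))
      else if c = '_' ∧ b = true then none else none) ∧
    (∀ c d t b a, G (c :: d :: t) b a =
      if c.isDigit = true then G (d :: t) true (a * 10 + (c.toNat - '0'.toNat))
      else if c = '_' ∧ b = true then (if d.isDigit = true then G (d :: t) false a else none)
      else none) := by
  refine ⟨?D, ?G, fun s => ?e1, fun l => ?anchor, ?e2, fun c l => ?e3, fun b a => ?e4,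
    fun c b a => ?e5, fun c d t b a => ?e6⟩
  case e1 => delta PySem.Int.ofChars?; rfl
  case anchor => rfl
  case e2 => rfl
  case e3 => rfl
  case e4 => rfl
  case e5 => rfl
  case e6 => rfl

lemma isIntSpace_of_digit (c : Char) (h : c.isDigit = true) : PySem.Int.isIntSpace c = false := by
  cases hsp : PySem.Int.isIntSpace c
  · rfl
  · exfalso
    simp only [PySem.Int.isIntSpace, Bool.or_eq_true, decide_eq_true_eq] at hsp
    rcases hsp with ((((h1 | h1) | h1) | h1) | h1) | h1 <;> subst h1 <;> simp at h

theorem digit_parse :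
    (∀ ds, (∀ c ∈ ds, c.isDigit = true) → ds ≠ [] →
      PySem.Int.ofChars? ds =
        some ((ds.foldl (fun a c => a * 10 + (c.toNat - '0'.toNat)) 0 : Nat) : Int)) := by
  obtain ⟨D, G, hOf, hanchor, hDnil, hDcons, hGnil, hG1, hG2⟩ := parse_exists
  have hG : ∀ ds, (∀ c ∈ ds, c.isDigit = true) → ds ≠ [] → ∀ (b : Bool) (a : Nat),
      G ds b a = some (ds.foldl (fun a c => a * 10 + (c.toNat - '0'.toNat)) a) := by
    intro ds
    induction ds with
    | nil => intro _ h; exact absurd rfl h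
    | cons c l ih =>
      intro hd _ b a
      have hc : c.isDigit = true := hd c (by simp)
      cases l with
      | nil => rw [hG1, if_pos hc, hGnil]; simp
      | cons d t =>
        rw [hG2, if_pos hc, ih (fun x hx => hd x (by simp [hx])) (by simp)]
        simp
  intro ds hd hne
  have hstrip : ((ds.dropWhile PySem.Int.isIntSpace).reverse.dropWhile PySem.Int.isIntSpace).reverse = ds := by
    have h1 : ds.dropWhile PySem.Int.isIntSpace = ds := by
      apply List.dropWhile_eq_self_iff.2
      intro h
      have hm : ds[0] ∈ ds := List.getElem_mem h
      rw [isIntSpace_of_digit _ (hd _ hm)]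
      simp
    have h2 : ds.reverse.dropWhile PySem.Int.isIntSpace = ds.reverse := by
      apply List.dropWhile_eq_self_iff.2
      intro h
      have hm : ds.reverse[0] ∈ ds := by
        rw [← List.mem_reverse]
        exact List.getElem_mem h
      rw [isIntSpace_of_digit _ (hd _ hm)]
      simp
    rw [h1, h2, List.reverse_reverse]
  rw [hOf ds, hstrip]
  obtain ⟨c, l, rfl⟩ : ∃ c l, ds = c :: l := by
    cases ds with
    | nil => exact absurd rfl hne
    | cons c l => exact ⟨c, l, rfl⟩
  have hc : c.isDigit = true := hd c (by simp)
  split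
  next ds' heq =>
    exfalso
    have : c = '-' := by injection heq.symm with h1 _; exact h1.symm
    subst this; simp at hc
  next ds' heq =>
    exfalso
    have : c = '+' := by injection heq.symm with h1 _; exact h1.symm
    subst this; simp at hc
  next =>
    rw [hDcons, hG (c :: l) hd (by simp)]
    rfl

-- toDigitsCore lemmas
lemma tdc_acc : ∀ (f n : Nat) (acc : List Char),
    Nat.toDigitsCore 10 f n acc = Nat.toDigitsCore 10 f n [] ++ acc := by
  intro f
  induction f with
  | zero => intro n acc; simp [Nat.toDigitsCore]
  | succ f ih =>
    intro n acc
    simp only [Nat.toDigitsCore]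
    by_cases h : n / 10 = 0
    · simp [h]
    · simp only [if_neg h]
      rw [ih (n/10) ((n % 10).digitChar :: acc), ih (n/10) [(n % 10).digitChar]]
      simp

lemma tdc_fuel : ∀ (f f' n : Nat) (acc : List Char), n < f → n < f' →
    Nat.toDigitsCore 10 f n acc = Nat.toDigitsCore 10 f' n acc := by
  intro f
  induction f with
  | zero => intro f' n acc h; omega
  | succ f ih =>
    intro f' n acc h h'
    cases f' with
    | zero => omega
    | succ f' =>
      simp only [Nat.toDigitsCore]
      by_cases h0 : n / 10 = 0
      · simp [h0]
      · simp only [if_neg h0]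
        exact ih f' (n/10) _ (by omega) (by omega)

lemma toDigits_lt (m : Nat) (hm : m < 10) : Nat.toDigits 10 m = [Nat.digitChar m] := by
  unfold Nat.toDigits
  simp [Nat.toDigitsCore, Nat.div_eq_of_lt hm, Nat.mod_eq_of_lt hm]

lemma toDigits_step (m g : Nat) (hm : 0 < m) (hg : g < 10) :
    Nat.toDigits 10 (10 * m + g) = Nat.toDigits 10 m ++ [Nat.digitChar g] := by
  have hdiv : (10 * m + g) / 10 = m := by omega
  have hmod : (10 * m + g) % 10 = g := by omega
  rw [show Nat.toDigits 10 (10 * m + g) = Nat.toDigitsCore 10 (10 * m + g + 1) (10 * m + g) [] from rfl]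
  simp only [Nat.toDigitsCore, hdiv, hmod]
  rw [if_neg (by omega)]
  rw [tdc_fuel (10*m+g) (m+1) m _ (by omega) (by omega), tdc_acc (m+1) m]
  rfl

lemma digitChar_isDigit (k : Nat) (hk : k < 10) : (Nat.digitChar k).isDigit = true := by
  interval_cases k <;> decide

lemma digitChar_val (k : Nat) (hk : k < 10) : (Nat.digitChar k).toNat - '0'.toNat = k := by
  interval_cases k <;> decide

lemma toDigits_allDigit : ∀ m : Nat, ∀ c ∈ Nat.toDigits 10 m, c.isDigit = true := by
  intro m
  induction m using Nat.strong_induction_on with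
  | _ m ih =>
    by_cases hm : m < 10
    · rw [toDigits_lt m hm]; intro c hc; simp at hc; subst hc; exact digitChar_isDigit m hm
    · have : m = 10 * (m / 10) + m % 10 := by omega
      rw [this, toDigits_step (m/10) (m%10) (by omega) (by omega)]
      intro c hc
      rcases List.mem_append.1 hc with h | h
      · exact ih (m/10) (by omega) c h
      · simp at h; subst h; exact digitChar_isDigit _ (by omega)

lemma Vfold_toDigits : ∀ m a : Nat,
    (Nat.toDigits 10 m).foldl (fun a c => a * 10 + (c.toNat - '0'.toNat)) a
      = a * 10 ^ (Nat.toDigits 10 m).length + m := by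
  intro m
  induction m using Nat.strong_induction_on with
  | _ m ih =>
    intro a
    by_cases hm : m < 10
    · rw [toDigits_lt m hm]
      simp only [List.foldl_cons, List.foldl_nil, List.length_cons, List.length_nil]
      rw [digitChar_val m hm]
      norm_num
    · have hm' : m = 10 * (m / 10) + m % 10 := by omega
      rw [hm', toDigits_step (m/10) (m%10) (by omega) (by omega)]
      rw [List.foldl_append, ih (m/10) (by omega) a]
      simp only [List.foldl_cons, List.foldl_nil, List.length_append, List.length_cons,
        List.length_nil, Nat.zero_add, pow_succ]
      rw [digitChar_val (m%10) (by omega : m % 10 < 10)]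
      ring_nf

lemma key_parse (m g : Nat) (hg : g < 10) :
    PySem.Int.ofChars? (Nat.toDigits 10 m ++ [Nat.digitChar g]) = some ((10 * m + g : Nat) : Int) := by
  rw [digit_parse (Nat.toDigits 10 m ++ [Nat.digitChar g])
      (by
        intro c hc
        rcases List.mem_append.1 hc with h | h
        · exact toDigits_allDigit m c h
        · simp at h; subst h; exact digitChar_isDigit g hg)
      (by simp)]
  simp only [Option.some_inj, Nat.cast_inj]
  rw [List.foldl_append, Vfold_toDigits m 0]
  simp only [List.foldl_cons, List.foldl_nil]
  rw [digitChar_val g hg]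
  omega

lemma single_parse (c : Char) (hc : c.isDigit = true) :
    PySem.Int.ofChars? [c] = some ((c.toNat - '0'.toNat : Nat) : Int) := by
  rw [digit_parse [c] (by simpa using hc) (by simp)]
  simp

lemma fold_fst {α σ τ : Type} : ∀ (l : List α) (F : σ × τ → α → σ × τ) (Fd : σ → α → σ),
    (∀ s x, x ∈ l → (F s x).1 = Fd s.1 x) → ∀ s0 : σ × τ, (l.foldl F s0).1 = l.foldl Fd s0.1 := by
  intro l
  induction l with
  | nil => intro F Fd h s0; rfl
  | cons x t ih =>
    intro F Fd h s0
    simp only [List.foldl_cons]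
    rw [ih F Fd (fun s y hy => h s y (by simp [hy])) (F s0 x), h s0 x (by simp)]

lemma headD_drop (instr : List (List Int)) (n : Nat) :
    (instr.drop n).headD [] = PySem.List.pyGetD instr (n : Int) [] := by
  rw [PySem.List.pyGetD_natCast]
  rw [List.headD_eq_head?_getD, List.head?_drop, List.getD_eq_getElem?_getD]

lemma runA_fold (instr : List (List Int)) : ∀ (ds : List Int) (k : Nat) (z : Int),
    ds.foldl
      (fun (s : List (List Int) × Int) val =>
        let vars := s.1.headD []
        let rest := s.1.tail
        let remainder := PySem.Int.mod s.2 26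
        let z1 := PySem.Int.floordiv s.2 (PySem.List.pyGetD vars 0 0)
        let z2 := if remainder + PySem.List.pyGetD vars 1 0 ≠ val
                  then 26 * z1 + val + PySem.List.pyGetD vars 2 0 else z1
        (rest, z2))
      (instr.drop k, z)
      = (instr.drop (k + ds.length),
         (PySem.List.enumerate ds (k : Int)).foldl
           (fun z p => stepMONAD z (PySem.List.pyGetD instr p.1 []) p.2) z) := by
  intro ds
  induction ds with
  | nil => intro k z; simp [PySem.List.enumerate]
  | cons d t ih =>
    intro k z
    simp only [List.foldl_cons, PySem.List.enumerate_cons, List.length_cons]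
    rw [List.tail_drop, headD_drop]
    rw [show ((k : Int) + 1) = ((k + 1 : Nat) : Int) by push_cast; ring]
    rw [show k + (t.length + 1) = (k + 1) + t.length by omega]
    exact ih (k + 1) _

lemma runSimply_decomp (instr : List (List Int)) (ds : List Int) (g : Int) :
    runSimply instr (ds ++ [g]) =
      stepMONAD
        ((PySem.List.enumerate ds 0).foldl
          (fun z p => stepMONAD z (PySem.List.pyGetD instr p.1 []) p.2) 0)
        (PySem.List.pyGetD instr (ds.length : Int) []) g := by
  have h := runA_fold instr ds 0 0
  rw [List.drop_zero, Nat.cast_zero, Nat.zero_add] at h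
  unfold runSimply
  rw [List.foldl_append, h]
  simp only [List.foldl_cons, List.foldl_nil]
  rw [headD_drop]
  rfl

lemma toChars_nonneg (f : Int) (hf : 0 ≤ f) : PySem.Int.toChars f = Nat.toDigits 10 f.toNat := by
  unfold PySem.Int.toChars
  rw [if_neg (by omega)]

lemma val_eq (f g : Int) (hf : 0 ≤ f) (hg1 : 1 ≤ g) (hg9 : g < 10) :
    (PySem.Int.ofChars? (PySem.Int.toChars f ++ PySem.Int.toChars g)).getD 0 = 10 * f + g := by
  rw [toChars_nonneg f hf, toChars_nonneg g (by omega), toDigits_lt g.toNat (by omega),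
    key_parse f.toNat g.toNat (by omega)]
  simp only [Option.getD_some]
  push_cast
  omega

lemma vals_eq (f g : Int) (hf : 0 ≤ f) (hg1 : 1 ≤ g) (hg9 : g < 10) :
    (PySem.Int.toChars (10 * f + g)).map (fun c => (PySem.Int.ofChars? [c]).getD 0)
      = (if f = 0 then []
         else (PySem.Int.toChars f).map (fun c => (PySem.Int.ofChars? [c]).getD 0)) ++ [g] := by
  have hsingle : ∀ k : Nat, k < 10 →
      (PySem.Int.ofChars? [Nat.digitChar k]).getD 0 = (k : Int) := by
    intro k hk
    rw [single_parse _ (digitChar_isDigit k hk), digitChar_val k hk]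
    rfl
  rw [toChars_nonneg (10 * f + g) (by omega)]
  by_cases hf0 : f = 0
  · subst hf0
    rw [if_pos rfl]
    rw [show ((10 * 0 + g : Int)).toNat = g.toNat by omega]
    rw [toDigits_lt g.toNat (by omega)]
    simp only [List.map_cons, List.map_nil, List.nil_append]
    rw [hsingle g.toNat (by omega)]
    rw [Int.toNat_of_nonneg (by omega)]
  · rw [if_neg hf0]
    rw [show ((10 * f + g : Int)).toNat = 10 * f.toNat + g.toNat by omega]
    rw [toDigits_step f.toNat g.toNat (by omega) (by omega)]
    rw [List.map_append]
    rw [toChars_nonneg f hf]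
    simp only [List.map_cons, List.map_nil]
    rw [hsingle g.toNat (by omega), Int.toNat_of_nonneg (by omega)]

-- ===== VERDICT (by name: the statement is the Claim_ definition above) =====
theorem addInput_spec : Claim_equal_addInput := by
  unfold Claim_equal_addInput
  intro zeds instr _hdom hpre
  unfold Spec_addInput addInput addInput_alt
  refine congrArg (fun d : PySem.Dict Int Int => d.items) ?_
  refine fold_fst _ _ _ ?_ _
  intro s f hmem
  have hf : 0 ≤ f := by
    rw [PySem.Dict.values_mk] at hmem
    obtain ⟨p, hp, rfl⟩ := List.mem_map.1 hmem
    exact (hpre p hp).1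
  refine fold_fst _ _ _ ?_ _
  intro s' g hg
  obtain ⟨hgl, hgr⟩ := (PySem.List.mem_pyRange_one).1 hg
  dsimp only
  rw [val_eq f g hf hgl hgr, vals_eq f g hf hgl hgr, runSimply_decomp]
  have hval : (0 : Int) < 10 * f + g := by omega
  generalize (stepMONAD
        ((PySem.List.enumerate
            (if f = 0 then []
             else (PySem.Int.toChars f).map (fun c => (PySem.Int.ofChars? [c]).getD 0)) 0).foldl
          (fun z p => stepMONAD z (PySem.List.pyGetD instr p.1 []) p.2) 0)
        (PySem.List.pyGetD instr
          (((if f = 0 then []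
             else (PySem.Int.toChars f).map (fun c => (PySem.Int.ofChars? [c]).getD 0)).length : Int)) [])
        g) = zt
  cases hq : PySem.Dict.get? s'.1 zt with
  | some cur =>
    rw [PySem.Dict.getD_of_get?_eq_some s'.1 0 hq]
    dsimp only
    by_cases hlt : 10 * f + g > cur
    · rw [if_pos hlt, if_pos hlt]
    · rw [if_neg hlt, if_neg hlt]
  | none =>
    have hgd : PySem.Dict.getD s'.1 zt (0 : Int) = 0 := by
      rw [PySem.Dict.getD_eq_get?_getD, hq]; rfl
    rw [hgd]
    dsimp only
    rw [if_pos hval, if_pos hval]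
    dsimp only
    rw [PySem.Dict.insert_insert_self]
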